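-- pv_equiv track=rewrite | github.com/CMDRZero/ReprLang | replang.py | tmark
-- ===== SOURCE A (Python) =====
-- def tmark(txt,tks):
--     o={}
--     for tk in tks:
--         for i in range(len(txt)-len(tk)):
--             if txt[i:i+len(tk)]==tk:
--                 d=o.get(tk,{})
--                 ttks=ftk(txt[i+len(tk):],tks)
--                 for ttk in ttks:
--                     d[ttk]=1+0*len(ttk)+d.get(ttk,0)
--                 o[tk]=d
--     return(o)
--
-- def ftk(txt,tks):
--     o=set()
--     l=0
--     for tk in tks:
--         if txt[:len(tk)]==tk:
-- ##            o.add(tk)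
--             if len(tk)>l:
--                 o=set([tk])
--                 l=len(tk)
--     return(list(o))
-- ===== SOURCE B (Python) =====
-- def tmark(txt, tks):
--     n = len(txt)
--     # pass 1: best[j] = longest token (first among equals) that prefixes txt[j:], or None
--     best = []
--     for j in range(n):
--         b = None
--         l = 0
--         for tk in tks:
--             lt = len(tk)
--             if lt > l and txt[j:j+lt] == tk:
--                 b = tk
--                 l = lt
--         best.append(b)
--     # pass 2: count, per token occurrence (with a non-empty remainder), the follower from the table
--     o = {}
--     for tk in tks:
--         lt = len(tk)
--         d = o.get(tk, {})
--         matched = False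
--         for j in range(n - lt):
--             if txt[j:j+lt] == tk:
--                 b = best[j + lt]
--                 if b is not None:
--                     d[b] = d.get(b, 0) + 1
--                 matched = True
--         if matched:
--             o[tk] = d
--     return o
-- ===== Notes on version B (the rewrite author's own statement) =====
-- stated objective: faster
-- what changed: B precomputes once, for every text index, the longest-prefix token (A's ftk) as a table, then counts followers by table lookup per occurrence instead of re-scanning all tokens with ftk at every match.
import Mathlib
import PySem

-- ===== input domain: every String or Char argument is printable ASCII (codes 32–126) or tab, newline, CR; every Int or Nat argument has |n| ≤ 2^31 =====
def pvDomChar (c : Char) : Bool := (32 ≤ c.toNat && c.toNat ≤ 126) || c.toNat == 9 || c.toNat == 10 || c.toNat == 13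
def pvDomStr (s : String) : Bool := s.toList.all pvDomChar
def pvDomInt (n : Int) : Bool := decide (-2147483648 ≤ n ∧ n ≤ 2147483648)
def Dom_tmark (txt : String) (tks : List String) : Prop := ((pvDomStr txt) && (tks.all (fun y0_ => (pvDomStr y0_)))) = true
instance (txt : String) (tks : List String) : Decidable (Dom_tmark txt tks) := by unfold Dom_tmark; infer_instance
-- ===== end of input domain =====

-- B replaces A's per-match ftk re-scan by a once-precomputed longest-prefix-token table (objective: faster).

-- ===== PORT A =====
def ftk (txt : String) (tks : List String) : List String :=
  (tks.foldl (fun (s : PySem.Set String × Int) tk =>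
      if PySem.Str.slice txt none (some ((PySem.Str.len tk : Int))) == tk then
        if (PySem.Str.len tk : Int) > s.2 then (PySem.Set.ofList [tk], (PySem.Str.len tk : Int))
        else s
      else s)
    (PySem.Set.empty, 0)).1

def tmark (txt : String) (tks : List String) : List (String × List (String × Int)) :=
  let o : PySem.Dict String (PySem.Dict String Int) :=
    tks.foldl (fun o tk =>
      (PySem.List.pyRange 0 ((PySem.Str.len txt : Int) - (PySem.Str.len tk : Int)) 1).foldl
        (fun o i =>
          if PySem.Str.slice txt (some i) (some (i + (PySem.Str.len tk : Int))) == tk then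
            let d := o.getD tk PySem.Dict.empty
            let ttks := ftk (PySem.Str.slice txt (some (i + (PySem.Str.len tk : Int))) none) tks
            let d := ttks.foldl (fun d ttk => d.insert ttk (1 + 0 * (PySem.Str.len ttk : Int) + d.getD ttk 0)) d
            o.insert tk d
          else o) o)
      PySem.Dict.empty
  o.items.map (fun p => (p.1, p.2.items))

-- ===== PORT B =====
def tmark_alt (txt : String) (tks : List String) : List (String × List (String × Int)) :=
  let n : Int := (PySem.Str.len txt : Int)
  let best : List (Option String) :=
    (PySem.List.pyRange 0 n 1).foldl (fun best j =>
      let bl := tks.foldl (fun (s : Option String × Int) tk =>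
          let lt : Int := (PySem.Str.len tk : Int)
          if lt > s.2 && (PySem.Str.slice txt (some j) (some (j + lt)) == tk) then (some tk, lt)
          else s)
        ((none : Option String), 0)
      best ++ [bl.1]) []
  let o : PySem.Dict String (PySem.Dict String Int) :=
    tks.foldl (fun o tk =>
      let lt : Int := (PySem.Str.len tk : Int)
      let dm := (PySem.List.pyRange 0 (n - lt) 1).foldl
        (fun (s : PySem.Dict String Int × Bool) j =>
          if PySem.Str.slice txt (some j) (some (j + lt)) == tk then
            let d := match PySem.List.pyGetD best (j + lt) none with
              | some b => s.1.insert b (s.1.getD b 0 + 1)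
              | none => s.1
            (d, true)
          else s)
        (o.getD tk PySem.Dict.empty, false)
      if dm.2 then o.insert tk dm.1 else o)
      PySem.Dict.empty
  o.items.map (fun p => (p.1, p.2.items))

-- ===== PRECONDITION & SPEC =====
def Spec_tmark (txt : String) (tks : List String) (out : List (String × List (String × Int))) : Prop := out = tmark_alt txt tks
instance (txt : String) (tks : List String) (out : List (String × List (String × Int))) : Decidable (Spec_tmark txt tks out) := by unfold Spec_tmark; infer_instance

-- ===== CLAIM (what is proved, stated in full; the proofs are below) =====
def Claim_equal_tmark : Prop := ∀ (txt : String) (tks : List String), Dom_tmark txt tks → Spec_tmark txt tks (tmark txt tks)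

-- ===== LEMMAS AND PROOFS =====

-- helper (proofs only): the ≤1-element list a best-table entry denotes
def optList : Option String → List String
  | none => []
  | some b => [b]

-- the longest-prefix-token scan at index j (B's inner loop, as a function)
def bAt (txt : String) (tks : List String) (j : Int) : Option String × Int :=
  tks.foldl (fun (s : Option String × Int) tk =>
      if (PySem.Str.len tk > s.2) && (PySem.Str.slice txt (some j) (some (j + PySem.Str.len tk)) == tk) then
        (some tk, PySem.Str.len tk)
      else s)
    ((none : Option String), 0)

-- slicing the suffix then taking a prefix is slicing a window
lemma sliceSlice (txt : String) (a L : Nat) :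
    PySem.Str.slice (PySem.Str.slice txt (some (a : Int)) none) none (some (L : Int)) =
    PySem.Str.slice txt (some (a : Int)) (some ((a : Int) + (L : Int))) := by
  apply String.toList_inj.mp
  simp [PySem.Str.slice]
  rw [← Nat.cast_add, PySem.List.slice_natCast]
  simp

-- ftk on the suffix at a computes exactly B's best-scan result at a
lemma ftk_eq_bAt (txt : String) (tks : List String) (a : Nat) :
    ftk (PySem.Str.slice txt (some (a : Int)) none) tks = optList (bAt txt tks (a : Int)).1 := by
  unfold ftk bAt
  suffices h : ∀ (ts : List String) (o : PySem.Set String) (b : Option String) (l : Int), o = optList b →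
      (ts.foldl (fun (s : PySem.Set String × Int) tk =>
        if PySem.Str.slice (PySem.Str.slice txt (some (a : Int)) none) none (some (PySem.Str.len tk)) == tk then
          if PySem.Str.len tk > s.2 then (PySem.Set.ofList [tk], PySem.Str.len tk) else s
        else s) (o, l)).1
      = optList (ts.foldl (fun (s : Option String × Int) tk =>
          if (PySem.Str.len tk > s.2) && (PySem.Str.slice txt (some (a : Int)) (some ((a : Int) + PySem.Str.len tk)) == tk) then
            (some tk, PySem.Str.len tk)
          else s) (b, l)).1 by
    exact h tks PySem.Set.empty none 0 rfl
  intro ts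
  induction ts with
  | nil => intro o b l h; simpa using h
  | cons tk ts ih =>
    intro o b l h
    have hc : (PySem.Str.slice (PySem.Str.slice txt (some (a : Int)) none) none (some (PySem.Str.len tk)) == tk)
            = (PySem.Str.slice txt (some (a : Int)) (some ((a : Int) + PySem.Str.len tk)) == tk) := by
      rw [PySem.Str.len_eq, sliceSlice]
    simp only [List.foldl_cons, hc]
    by_cases hcnd : (PySem.Str.slice txt (some (a : Int)) (some ((a : Int) + PySem.Str.len tk)) == tk) = true <;>
      by_cases hl : PySem.Str.len tk > l <;>
      simp only [hcnd, hl, h, if_false, Bool.and_true, Bool.and_false, decide_true, decide_false,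
        if_pos] <;>
      exact ih _ _ _ rfl

-- the precomputed table, read at a valid index, is the best-scan there
lemma best_lookup (txt : String) (f : Int → Option String) (a : Nat)
    (ha : a < txt.toList.length) :
    PySem.List.pyGetD ((PySem.List.pyRange 0 (PySem.Str.len txt) 1).map f) ((a : Int)) none = f (a : Int) := by
  rw [PySem.Str.len_eq, PySem.List.pyRange_zero_natCast, PySem.List.pyGetD_natCast, List.map_map]
  rw [List.getD_eq_getElem?_getD, List.getElem?_map, List.getElem?_range ha]
  simp

-- a pair fold with a flag is the plain fold plus an `any`
lemma pairfold {D : Type} (is : List Int) (P : Int → Bool) (upd : D → Int → D) (d : D) (m : Bool) :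
    is.foldl (fun (s : D × Bool) i => if P i then (upd s.1 i, true) else s) (d, m)
    = (is.foldl (fun d i => if P i then upd d i else d) d, m || is.any P) := by
  induction is generalizing d m with
  | nil => simp
  | cons i is ih => by_cases h : P i <;> simp [h, ih]

-- once tk's key is present, A's repeated re-insert loop is a fold on the value
lemma insfold (is : List Int) (P : Int → Bool) (upd : PySem.Dict String Int → Int → PySem.Dict String Int)
    (tk : String) (o : PySem.Dict String (PySem.Dict String Int)) (d : PySem.Dict String Int) :
    is.foldl (fun o i => if P i then o.insert tk (upd (o.getD tk PySem.Dict.empty) i) else o) (o.insert tk d)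
    = o.insert tk (is.foldl (fun d i => if P i then upd d i else d) d) := by
  induction is generalizing d with
  | nil => simp
  | cons i is ih =>
    by_cases h : P i
    · simp only [List.foldl_cons, h, if_true, PySem.Dict.getD_insert_self, PySem.Dict.insert_insert_self]
      exact ih _
    · simp only [List.foldl_cons, h]
      exact ih _

-- A's insert-at-every-match loop equals B's fold-then-single-insert
lemma mainIns (is : List Int) (P : Int → Bool) (upd : PySem.Dict String Int → Int → PySem.Dict String Int)
    (tk : String) :
    ∀ (o : PySem.Dict String (PySem.Dict String Int)),
    is.foldl (fun o i => if P i then o.insert tk (upd (o.getD tk PySem.Dict.empty) i) else o) o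
    = (fun s : PySem.Dict String Int × Bool => if s.2 then o.insert tk s.1 else o)
        (is.foldl (fun (s : PySem.Dict String Int × Bool) i => if P i then (upd s.1 i, true) else s)
          (o.getD tk PySem.Dict.empty, false)) := by
  induction is with
  | nil => intro o; simp
  | cons i is ih =>
    intro o
    by_cases h : P i
    · simp only [List.foldl_cons, h, if_true]
      rw [insfold, pairfold]
      simp
    · simp only [List.foldl_cons, h]
      exact ih o

-- at every in-range position, A's per-match update (ftk then count) equals B's table-lookup update
lemma upd_eq (txt : String) (tks : List String) (tk : String) (i : Int)
    (h0 : 0 ≤ i) (h1 : i + PySem.Str.len tk < PySem.Str.len txt) (d : PySem.Dict String Int) :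
    (ftk (PySem.Str.slice txt (some (i + PySem.Str.len tk)) none) tks).foldl
      (fun d ttk => d.insert ttk (1 + 0 * PySem.Str.len ttk + d.getD ttk 0)) d
    = match PySem.List.pyGetD ((PySem.List.pyRange 0 (PySem.Str.len txt) 1).map (fun j => (bAt txt tks j).1))
          (i + PySem.Str.len tk) none with
      | some b => d.insert b (d.getD b 0 + 1)
      | none => d := by
  have hlen : (0:Int) ≤ PySem.Str.len tk := by rw [PySem.Str.len_eq]; positivity
  set a : Nat := (i + PySem.Str.len tk).toNat with hadef
  have hcast : ((a : Int)) = i + PySem.Str.len tk := by omega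
  have ha : a < txt.toList.length := by
    have := PySem.Str.len_eq txt; omega
  rw [← hcast, best_lookup txt _ a ha, ftk_eq_bAt]
  cases hb : (bAt txt tks (a : Int)).1 with
  | none => simp [optList]
  | some b =>
    simp only [optList, List.foldl_cons, List.foldl_nil]
    congr 1
    ring


-- B's per-match update: table lookup then counter bump
def updB (txt : String) (tks : List String) (lt : Int) (d : PySem.Dict String Int) (i : Int) :
    PySem.Dict String Int :=
  match PySem.List.pyGetD ((PySem.List.pyRange 0 (PySem.Str.len txt) 1).map (fun j => (bAt txt tks j).1))
      (i + lt) none with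
  | some b => d.insert b (d.getD b 0 + 1)
  | none => d

-- A's whole per-token pass equals B's whole per-token pass
lemma body_eq (txt : String) (tks : List String) (tk : String)
    (o : PySem.Dict String (PySem.Dict String Int)) :
    (PySem.List.pyRange 0 (PySem.Str.len txt - PySem.Str.len tk) 1).foldl
      (fun o i =>
        if PySem.Str.slice txt (some i) (some (i + PySem.Str.len tk)) == tk then
          o.insert tk
            ((ftk (PySem.Str.slice txt (some (i + PySem.Str.len tk)) none) tks).foldl
              (fun d ttk => d.insert ttk (1 + 0 * PySem.Str.len ttk + d.getD ttk 0))
              (o.getD tk PySem.Dict.empty))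
        else o) o
    = (if ((PySem.List.pyRange 0 (PySem.Str.len txt - PySem.Str.len tk) 1).foldl
          (fun (s : PySem.Dict String Int × Bool) i =>
            if PySem.Str.slice txt (some i) (some (i + PySem.Str.len tk)) == tk then
              (updB txt tks (PySem.Str.len tk) s.1 i, true) else s)
          (o.getD tk PySem.Dict.empty, false)).2 then
        o.insert tk ((PySem.List.pyRange 0 (PySem.Str.len txt - PySem.Str.len tk) 1).foldl
          (fun (s : PySem.Dict String Int × Bool) i =>
            if PySem.Str.slice txt (some i) (some (i + PySem.Str.len tk)) == tk then
              (updB txt tks (PySem.Str.len tk) s.1 i, true) else s)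
          (o.getD tk PySem.Dict.empty, false)).1
      else o) := by
  refine Eq.trans (PySem.List.foldl_congr_mem _ _
    (fun o i =>
      if PySem.Str.slice txt (some i) (some (i + PySem.Str.len tk)) == tk then
        o.insert tk (updB txt tks (PySem.Str.len tk) (o.getD tk PySem.Dict.empty) i) else o) _ ?_) ?_
  · intro o i hi
    rw [PySem.List.mem_pyRange_one] at hi
    cases hc : (PySem.Str.slice txt (some i) (some (i + PySem.Str.len tk)) == tk) with
    | false => simp only [hc, Bool.false_eq_true, if_false]
    | true =>
      simp only [hc, if_true]
      congr 1
      simp only [updB]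
      exact upd_eq txt tks tk i hi.1 (by omega) _
  · exact mainIns _ _ _ _ o

-- ===== VERDICT (by name: the statement is the Claim_ definition above) =====
theorem tmark_spec : Claim_equal_tmark := by
  intro txt tks _
  show tmark txt tks = tmark_alt txt tks
  simp only [tmark, tmark_alt]
  rw [PySem.List.foldl_append_singleton_eq_map]
  simp only [List.nil_append]
  congr 1
  congr 1
  exact PySem.List.foldl_congr_mem _ _ _ _ (fun o tk _ => body_eq txt tks tk o)
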